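-- pv_equiv track=rewrite | github.com/guparan/sofa2ng | tools/constructor.py | reorderCommands
-- ===== SOURCE A (Python) =====
-- def reorderCommands(tasks):
--     mkdirCmds = []
--     moveCmds = []
--     createCmds = []
--     generatorCmds = []
--     fixCmds = []
--     lastCmds = []
--     preCmds = []
--     for i in tasks:
--         if i[0] in ["mkdir"]:
--             mkdirCmds.append(i)
--         elif i[0] in ["move", "rm"]:
--             moveCmds.append(i)
--         elif i[0] in ["mkconfig"]:
--             createCmds.append(i)
--         elif i[0] in ["generator", "mkforward", "fixheaders"]:
--             generatorCmds.append(i)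
--         elif i[0] in ["rename"]:
--             fixCmds.append(i)
--         elif i[0] in ["post"]:
--             lastCmds.append(i[1:])
--         elif i[0] in ["post"]:
--             preCmds.append(i[1:])
--         else:
--             lastCmds.append(i)
--     return preCmds + mkdirCmds + moveCmds + generatorCmds + createCmds + fixCmds + lastCmds
-- ===== SOURCE B (Python) =====
-- def reorderCommands(tasks):
--     def prio(i):
--         h = i[0]
--         if h == "mkdir":
--             return 1
--         if h in ("move", "rm"):
--             return 2
--         if h in ("generator", "mkforward", "fixheaders"):
--             return 3
--         if h == "mkconfig":
--             return 4
--         if h == "rename":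
--             return 5
--         return 6
--     return [i[1:] if i[0] == "post" else i for i in sorted(tasks, key=prio)]
-- ===== Notes on version B (the rewrite author's own statement) =====
-- stated objective: alternative
-- what changed: Replaces the seven-accumulator bucketing loop with a single stable sort keyed by a bucket priority, followed by one comprehension that strips the 'post' tag.
import Mathlib
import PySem

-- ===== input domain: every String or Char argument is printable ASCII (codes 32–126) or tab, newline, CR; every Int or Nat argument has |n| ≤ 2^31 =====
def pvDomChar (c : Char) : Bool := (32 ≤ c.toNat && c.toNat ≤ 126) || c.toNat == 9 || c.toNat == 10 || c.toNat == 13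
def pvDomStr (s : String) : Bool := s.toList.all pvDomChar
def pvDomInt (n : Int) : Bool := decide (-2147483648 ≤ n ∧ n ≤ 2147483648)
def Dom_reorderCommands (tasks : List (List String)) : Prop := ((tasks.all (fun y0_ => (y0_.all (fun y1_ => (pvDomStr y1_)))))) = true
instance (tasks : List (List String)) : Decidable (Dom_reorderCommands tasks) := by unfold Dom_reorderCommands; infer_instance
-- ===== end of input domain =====

-- B replaces A's seven-accumulator bucketing loop by one stable sort on a bucket
-- priority plus a map stripping the 'post' tag; same output, different decomposition.


-- shared trivial helper: i[0]; Pre_ excludes empty i, where Python raises IndexError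
def pvHead0 (i : List String) : String := PySem.List.pyGetD i 0 ""

-- ===== PORT A =====
structure RState where
  mkdirCmds : List (List String)
  moveCmds : List (List String)
  createCmds : List (List String)
  generatorCmds : List (List String)
  fixCmds : List (List String)
  lastCmds : List (List String)
  preCmds : List (List String)
deriving Repr, DecidableEq

def reorderStep (s : RState) (i : List String) : RState :=
  if pvHead0 i == "mkdir" then { s with mkdirCmds := s.mkdirCmds ++ [i] }
  else if pvHead0 i == "move" || pvHead0 i == "rm" then { s with moveCmds := s.moveCmds ++ [i] }
  else if pvHead0 i == "mkconfig" then { s with createCmds := s.createCmds ++ [i] }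
  else if pvHead0 i == "generator" || pvHead0 i == "mkforward" || pvHead0 i == "fixheaders" then
    { s with generatorCmds := s.generatorCmds ++ [i] }
  else if pvHead0 i == "rename" then { s with fixCmds := s.fixCmds ++ [i] }
  else if pvHead0 i == "post" then { s with lastCmds := s.lastCmds ++ [PySem.List.slice i (some 1) none] }
  else if pvHead0 i == "post" then { s with preCmds := s.preCmds ++ [PySem.List.slice i (some 1) none] }  -- dead elif, as in A
  else { s with lastCmds := s.lastCmds ++ [i] }

def reorderCommands (tasks : List (List String)) : List (List String) :=
  let s := tasks.foldl reorderStep ⟨[], [], [], [], [], [], []⟩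
  s.preCmds ++ s.mkdirCmds ++ s.moveCmds ++ s.generatorCmds ++ s.createCmds ++ s.fixCmds ++ s.lastCmds

-- ===== PORT B =====
def pvPrio (i : List String) : Int :=
  if pvHead0 i == "mkdir" then 1
  else if pvHead0 i == "move" || pvHead0 i == "rm" then 2
  else if pvHead0 i == "generator" || pvHead0 i == "mkforward" || pvHead0 i == "fixheaders" then 3
  else if pvHead0 i == "mkconfig" then 4
  else if pvHead0 i == "rename" then 5
  else 6

def pvStrip (i : List String) : List String :=
  if pvHead0 i == "post" then PySem.List.slice i (some 1) none else i

def reorderCommands_alt (tasks : List (List String)) : List (List String) :=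
  (PySem.List.sorted tasks pvPrio).map pvStrip

-- ===== PRECONDITION & SPEC =====
-- Pre_ excludes exactly the inputs containing an empty task, on which both Pythons raise IndexError at i[0].
def Pre_reorderCommands (tasks : List (List String)) : Prop := ∀ i ∈ tasks, i ≠ []
instance (tasks : List (List String)) : Decidable (Pre_reorderCommands tasks) := by unfold Pre_reorderCommands; infer_instance
def pvWitness_reorderCommands : List (List String) :=
  [["mkdir", "a"], ["post", "x", "y"], ["rm", "b"], ["foo"], ["rename", "c"]]
def Spec_reorderCommands (tasks : List (List String)) (out : List (List String)) : Prop := out = reorderCommands_alt tasks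
instance (tasks : List (List String)) (out : List (List String)) : Decidable (Spec_reorderCommands tasks out) := by unfold Spec_reorderCommands; infer_instance

-- ===== CLAIM (what is proved, stated in full; the proofs are below) =====
def Claim_equal_reorderCommands : Prop := ∀ (tasks : List (List String)), Dom_reorderCommands tasks → Pre_reorderCommands tasks → Spec_reorderCommands tasks (reorderCommands tasks)

-- ===== LEMMAS AND PROOFS =====

-- bucket k of xs, in original order
def pvF (k : Int) (xs : List (List String)) : List (List String) :=
  xs.filter (fun i => pvPrio i == k)

theorem pvF_cons (k : Int) (i : List String) (xs : List (List String)) :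
    pvF k (i :: xs) = if pvPrio i == k then i :: pvF k xs else pvF k xs := by
  simp [pvF, List.filter_cons]

theorem pvF_append (k : Int) (xs : List (List String)) (x : List String) :
    pvF k (xs ++ [x]) = pvF k xs ++ (if pvPrio x == k then [x] else []) := by
  simp [pvF, List.filter_append]; split <;> simp_all

theorem mem_pvF {k : Int} {xs : List (List String)} {y : List String}
    (h : y ∈ pvF k xs) : pvPrio y = k := by
  simp [pvF, List.mem_filter] at h; exact h.2

theorem prio_cases (i : List String) :
    pvPrio i = 1 ∨ pvPrio i = 2 ∨ pvPrio i = 3 ∨ pvPrio i = 4 ∨ pvPrio i = 5 ∨ pvPrio i = 6 := by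
  unfold pvPrio; split_ifs <;> simp

theorem insertBy_split {α : Type} (before : α → α → Bool) (x : α) (u v : List α)
    (hu : ∀ y ∈ u, before x y = false) (hv : ∀ z ∈ v, before x z = true) :
    PySem.List.insertBy before x (u ++ v) = u ++ x :: v := by
  induction u with
  | nil =>
    cases v with
    | nil => simpa using PySem.List.insertBy_of_forall_not_before before x [] (by simp)
    | cons z t => unfold PySem.List.insertBy; simp [hv z List.mem_cons_self]
  | cons a u ih =>
    have ha := hu a List.mem_cons_self
    have ih' := ih (fun y hy => hu y (List.mem_cons_of_mem _ hy))
    unfold PySem.List.insertBy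
    simp [ha, ih']

theorem insertBy_prio (x : List String) (k : Int) (hk : pvPrio x = k)
    (u v : List (List String)) (hu : ∀ y ∈ u, ¬ k < pvPrio y) (hv : ∀ z ∈ v, k < pvPrio z) :
    PySem.List.insertBy (fun a b => decide (pvPrio a < pvPrio b)) x (u ++ v) = u ++ x :: v :=
  insertBy_split _ x u v (by intro y hy; simp [hk, hu y hy])
    (by intro z hz; simp [hk, hv z hz])

theorem sorted_buckets (xs : List (List String)) :
    PySem.List.sorted xs pvPrio =
      pvF 1 xs ++ pvF 2 xs ++ pvF 3 xs ++ pvF 4 xs ++ pvF 5 xs ++ pvF 6 xs := by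
  induction xs using List.reverseRecOn with
  | nil => simp [PySem.List.sorted_eq_foldl_insertBy, pvF]
  | append_singleton xs x ih =>
    rw [PySem.List.sorted_eq_foldl_insertBy] at ih ⊢
    rw [List.foldl_append, List.foldl_cons, List.foldl_nil, ih]
    simp only [pvF_append]
    rcases prio_cases x with h | h | h | h | h | h <;> simp only [h] <;> norm_num
    · have e := insertBy_prio x 1 h (pvF 1 xs)
        (pvF 2 xs ++ (pvF 3 xs ++ (pvF 4 xs ++ (pvF 5 xs ++ pvF 6 xs))))
        (by intro y hy; rw [mem_pvF hy]; omega)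
        (by intro z hz; simp only [List.mem_append] at hz
            rcases hz with hz | hz | hz | hz | hz <;> rw [mem_pvF hz] <;> omega)
      exact e
    · have e := insertBy_prio x 2 h (pvF 1 xs ++ pvF 2 xs)
        (pvF 3 xs ++ (pvF 4 xs ++ (pvF 5 xs ++ pvF 6 xs)))
        (by intro y hy; simp only [List.mem_append] at hy
            rcases hy with hy | hy <;> rw [mem_pvF hy] <;> omega)
        (by intro z hz; simp only [List.mem_append] at hz
            rcases hz with hz | hz | hz | hz <;> rw [mem_pvF hz] <;> omega)
      simp only [List.append_assoc] at e ⊢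
      rw [e]
    · have e := insertBy_prio x 3 h (pvF 1 xs ++ (pvF 2 xs ++ pvF 3 xs))
        (pvF 4 xs ++ (pvF 5 xs ++ pvF 6 xs))
        (by intro y hy; simp only [List.mem_append] at hy
            rcases hy with hy | hy | hy <;> rw [mem_pvF hy] <;> omega)
        (by intro z hz; simp only [List.mem_append] at hz
            rcases hz with hz | hz | hz <;> rw [mem_pvF hz] <;> omega)
      simp only [List.append_assoc] at e ⊢
      rw [e]
    · have e := insertBy_prio x 4 h (pvF 1 xs ++ (pvF 2 xs ++ (pvF 3 xs ++ pvF 4 xs)))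
        (pvF 5 xs ++ pvF 6 xs)
        (by intro y hy; simp only [List.mem_append] at hy
            rcases hy with hy | hy | hy | hy <;> rw [mem_pvF hy] <;> omega)
        (by intro z hz; simp only [List.mem_append] at hz
            rcases hz with hz | hz <;> rw [mem_pvF hz] <;> omega)
      simp only [List.append_assoc] at e ⊢
      rw [e]
    · have e := insertBy_prio x 5 h (pvF 1 xs ++ (pvF 2 xs ++ (pvF 3 xs ++ (pvF 4 xs ++ pvF 5 xs))))
        (pvF 6 xs)
        (by intro y hy; simp only [List.mem_append] at hy
            rcases hy with hy | hy | hy | hy | hy <;> rw [mem_pvF hy] <;> omega)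
        (by intro z hz; rw [mem_pvF hz]; omega)
      simp only [List.append_assoc] at e ⊢
      rw [e]
    · have e := insertBy_prio x 6 h
        (pvF 1 xs ++ (pvF 2 xs ++ (pvF 3 xs ++ (pvF 4 xs ++ (pvF 5 xs ++ pvF 6 xs))))) []
        (by intro y hy; simp only [List.mem_append] at hy
            rcases hy with hy | hy | hy | hy | hy | hy <;> rw [mem_pvF hy] <;> omega)
        (by intro z hz; simp at hz)
      simp only [List.append_assoc, List.append_nil] at e ⊢
      rw [e]

theorem fold_buckets (tasks : List (List String)) (s : RState) :
    tasks.foldl reorderStep s =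
      ⟨s.mkdirCmds ++ pvF 1 tasks, s.moveCmds ++ pvF 2 tasks, s.createCmds ++ pvF 4 tasks,
       s.generatorCmds ++ pvF 3 tasks, s.fixCmds ++ pvF 5 tasks,
       s.lastCmds ++ (pvF 6 tasks).map pvStrip, s.preCmds⟩ := by
  induction tasks generalizing s with
  | nil => simp [pvF]
  | cons i rest ih =>
    rw [List.foldl_cons, ih]
    unfold reorderStep
    split_ifs with h1 h2 h3 h4 h5 h6 <;>
      simp_all [pvF_cons, pvPrio, pvStrip]

theorem strip_id_of_prio_ne {y : List String} (h : pvPrio y ≠ 6) : pvStrip y = y := by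
  unfold pvStrip
  split_ifs with hp
  · exfalso; apply h; unfold pvPrio; simp_all
  · rfl

theorem map_strip_pvF {k : Int} (hk : k ≠ 6) (xs : List (List String)) :
    (pvF k xs).map pvStrip = pvF k xs := by
  rw [List.map_congr_left (fun y hy => strip_id_of_prio_ne (by rw [mem_pvF hy]; exact hk))]
  simp

-- ===== VERDICT (by name: the statement is the Claim_ definition above) =====
theorem reorderCommands_spec : Claim_equal_reorderCommands := by
  intro tasks _ _
  unfold Spec_reorderCommands reorderCommands reorderCommands_alt
  rw [sorted_buckets, fold_buckets]
  simp only [List.map_append, map_strip_pvF (by decide : (1:Int) ≠ 6),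
    map_strip_pvF (by decide : (2:Int) ≠ 6), map_strip_pvF (by decide : (3:Int) ≠ 6),
    map_strip_pvF (by decide : (4:Int) ≠ 6), map_strip_pvF (by decide : (5:Int) ≠ 6)]
  simp
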